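-- pv_equiv track=rewrite | github.com/cmbenello/141-discussion-final | solutions/conditionals_loops_sols.py | cl_30_count_valleys
-- ===== SOURCE A (Python) =====
-- def cl_30_count_valleys(steps: str) -> int:
--     level = 0
--     valleys = 0
--     for step in steps:
--         if step not in {"U", "D"}:
--             raise ValueError("steps must contain only 'U' or 'D'")
--         if step == "D":
--             if level == 0:
--                 valleys += 1
--             level -= 1
--         else:
--             level += 1
--     return valleys
-- ===== SOURCE B (Python) =====
-- def cl_30_count_valleys(steps: str) -> int:
--     # validation pass first (same exception as the original on invalid input)
--     for step in steps:
--         if step not in ("U", "D"):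
--             raise ValueError("steps must contain only 'U' or 'D'")
--     # table pass: deltas and cumulative levels
--     deltas = [1 if s == "U" else -1 for s in steps]
--     levels = []
--     total = 0
--     for d in deltas:
--         total += d
--         levels.append(total)
--     # counting pass: a valley is entered by a 'D' taken at level 0
--     return sum(1 for s, lev, d in zip(steps, levels, deltas)
--                if s == "D" and lev - d == 0)
-- ===== Notes on version B (the rewrite author's own statement) =====
-- stated objective: alternative
-- what changed: Replaces the single stateful loop by three separate passes: a validation pass, a table pass building step deltas and cumulative levels, and a counting pass that sums the down-steps whose preceding level is zero.
import Mathlib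
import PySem

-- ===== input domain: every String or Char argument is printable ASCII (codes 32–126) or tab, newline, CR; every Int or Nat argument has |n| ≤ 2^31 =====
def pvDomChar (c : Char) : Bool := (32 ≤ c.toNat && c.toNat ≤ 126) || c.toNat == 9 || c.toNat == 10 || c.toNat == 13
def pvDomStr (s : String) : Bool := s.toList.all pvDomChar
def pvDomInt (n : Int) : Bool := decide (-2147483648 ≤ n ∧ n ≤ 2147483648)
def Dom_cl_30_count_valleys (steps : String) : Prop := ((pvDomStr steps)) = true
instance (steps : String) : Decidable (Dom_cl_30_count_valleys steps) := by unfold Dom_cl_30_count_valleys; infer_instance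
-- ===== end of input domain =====

-- B replaces A's single stateful loop by three passes (validate; build delta/cumulative-level tables; count); equivalence of the return values is proved on all valid 'U'/'D' strings.

-- ===== PORT A =====
-- loop state: none = ValueError raised; some (level, valleys)
def pvAStep (st : Option (Int × Int)) (c : Char) : Option (Int × Int) :=
  match st with
  | none => none
  | some (level, valleys) =>
    if ¬ (c = 'U' ∨ c = 'D') then none  -- raise ValueError
    else if c = 'D' then
      some (level - 1, if level = 0 then valleys + 1 else valleys)
    else
      some (level + 1, valleys)

def cl_30_count_valleys (steps : String) : Int :=
  match steps.toList.foldl pvAStep (some (0, 0)) with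
  | some (_, valleys) => valleys
  | none => 0  -- ValueError path; excluded by Pre_

-- ===== PORT B =====
-- cumulative sums (the second pass of Source B)
def pvAccum : List Int → Int → List Int
  | [], _ => []
  | d :: ds, total => (total + d) :: pvAccum ds (total + d)

def cl_30_count_valleys_alt (steps : String) : Int :=
  let cs := steps.toList
  if ¬ (∀ c ∈ cs, c = 'U' ∨ c = 'D') then 0  -- validation pass raises ValueError; excluded by Pre_
  else
    let deltas := cs.map (fun s => if s = 'U' then (1 : Int) else -1)
    let levels := pvAccum deltas 0
    (cs.zip (levels.zip deltas)).foldl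
      (fun acc p => if p.1 = 'D' ∧ p.2.1 - p.2.2 = 0 then acc + 1 else acc) 0

-- ===== PRECONDITION & SPEC =====
-- Pre_ excludes exactly the inputs on which A raises ValueError (a character other than 'U'/'D').
def Pre_cl_30_count_valleys (steps : String) : Prop :=
  (steps.toList.all (fun c => c == 'U' || c == 'D')) = true
instance (steps : String) : Decidable (Pre_cl_30_count_valleys steps) := by
  unfold Pre_cl_30_count_valleys; infer_instance

def pvWitness_cl_30_count_valleys : String := "UDDUUDU"

def Spec_cl_30_count_valleys (steps : String) (out : Int) : Prop := out = cl_30_count_valleys_alt steps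
instance (steps : String) (out : Int) : Decidable (Spec_cl_30_count_valleys steps out) := by unfold Spec_cl_30_count_valleys; infer_instance

-- ===== CLAIM (what is proved, stated in full; the proofs are below) =====
def Claim_equal_cl_30_count_valleys : Prop := ∀ (steps : String), Dom_cl_30_count_valleys steps → Pre_cl_30_count_valleys steps → Spec_cl_30_count_valleys steps (cl_30_count_valleys steps)

-- ===== LEMMAS AND PROOFS =====

-- reference count: number of 'D' steps taken while the running level (started at l) is 0
def pvG : List Char → Int → Int
  | [], _ => 0
  | c :: cs, l =>
    (if c = 'D' ∧ l = 0 then 1 else 0) + pvG cs (l + (if c = 'U' then 1 else -1))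

lemma pvA_fold_eq (cs : List Char) : ∀ (l v : Int), (∀ c ∈ cs, c = 'U' ∨ c = 'D') →
    ∃ l', cs.foldl pvAStep (some (l, v)) = some (l', v + pvG cs l) := by
  induction cs with
  | nil => intro l v _; exact ⟨l, by simp [pvG]⟩
  | cons c cs ih =>
    intro l v h
    have hc := h c (by simp)
    have hrest : ∀ x ∈ cs, x = 'U' ∨ x = 'D' := fun x hx => h x (by simp [hx])
    rcases hc with hU | hD
    · subst hU
      simp only [List.foldl_cons, pvAStep, pvG]
      obtain ⟨l', hl'⟩ := ih (l + 1) v hrest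
      exact ⟨l', by simp [hl']⟩
    · subst hD
      simp only [List.foldl_cons, pvAStep, pvG]
      by_cases hl : l = 0
      · subst hl
        obtain ⟨l', hl'⟩ := ih (0 - 1) (v + 1) hrest
        refine ⟨l', ?_⟩
        simpa [pvAStep, sub_eq_add_neg, add_assoc, add_comm, add_left_comm] using hl'
      · obtain ⟨l', hl'⟩ := ih (l - 1) v hrest
        refine ⟨l', ?_⟩
        have he : l + -1 = l - 1 := by ring
        simp [pvAStep, hl, he, hl']

lemma pvB_count_eq (cs : List Char) : ∀ (l acc : Int),
    (cs.zip ((pvAccum (cs.map (fun s => if s = 'U' then (1 : Int) else -1)) l).zip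
        (cs.map (fun s => if s = 'U' then (1 : Int) else -1)))).foldl
      (fun acc p => if p.1 = 'D' ∧ p.2.1 - p.2.2 = 0 then acc + 1 else acc) acc
    = acc + pvG cs l := by
  induction cs with
  | nil => intro l acc; simp [pvAccum, pvG]
  | cons c cs ih =>
    intro l acc
    simp only [List.map_cons, pvAccum, List.zip_cons_cons, List.foldl_cons, pvG]
    have hcond : (c = 'D' ∧ l + (if c = 'U' then (1:Int) else -1) - (if c = 'U' then (1:Int) else -1) = 0) ↔ (c = 'D' ∧ l = 0) := by
      constructor <;> (rintro ⟨h1, h2⟩; exact ⟨h1, by omega⟩)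
    by_cases h : c = 'D' ∧ l = 0
    · rw [if_pos (hcond.mpr h), ih]
      simp [h, add_assoc]
    · rw [if_neg (fun hh => h (hcond.mp hh)), ih]
      simp [if_neg h]

-- ===== VERDICT (by name: the statement is the Claim_ definition above) =====
theorem cl_30_count_valleys_spec : Claim_equal_cl_30_count_valleys := by
  intro steps _ hpre0
  have hpre : ∀ c ∈ steps.toList, c = 'U' ∨ c = 'D' := by
    intro c hc
    have := List.all_eq_true.mp hpre0 c hc
    simpa using this
  unfold Spec_cl_30_count_valleys cl_30_count_valleys cl_30_count_valleys_alt
  obtain ⟨l', hl'⟩ := pvA_fold_eq steps.toList 0 0 hpre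
  rw [hl']
  simp [not_not_intro hpre, pvB_count_eq steps.toList 0 0]
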